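-- pv_equiv track=rewrite | github.com/skumar9876/L2_Init | utils/commands/train/parallel_runs_random_label_mnist.py | generate_commands
-- ===== SOURCE A (Python) =====
-- from itertools import product
--
-- def generate_commands(base_command, params):
--     """
--     Generate a list of commands based on the base command and parameters.
--     """
--     keys = list(params.keys())
--     values = list(params.values())
--     # Generate all combinations of parameters
--     combinations = list(product(*values))
--     commands = []
--     for combination in combinations:
--         command = base_command
--         for key, value in zip(keys, combination):
--             command += f" {key}={value}"
--         commands.append(command)
--     return commands
-- ===== SOURCE B (Python) =====
-- def generate_commands(base_command, params):
--     """
--     Generate a list of commands based on the base command and parameters.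
--     """
--     results = [base_command]
--     for key, values in params.items():
--         results = [cmd + f" {key}={value}" for cmd in results for value in values]
--     return results
-- ===== Notes on version B (the rewrite author's own statement) =====
-- stated objective: simpler
-- what changed: Replaces itertools.product plus a per-combination zip/loop by a single fold over the parameter keys that expands a growing list of partial commands one key at a time.
import Mathlib
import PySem

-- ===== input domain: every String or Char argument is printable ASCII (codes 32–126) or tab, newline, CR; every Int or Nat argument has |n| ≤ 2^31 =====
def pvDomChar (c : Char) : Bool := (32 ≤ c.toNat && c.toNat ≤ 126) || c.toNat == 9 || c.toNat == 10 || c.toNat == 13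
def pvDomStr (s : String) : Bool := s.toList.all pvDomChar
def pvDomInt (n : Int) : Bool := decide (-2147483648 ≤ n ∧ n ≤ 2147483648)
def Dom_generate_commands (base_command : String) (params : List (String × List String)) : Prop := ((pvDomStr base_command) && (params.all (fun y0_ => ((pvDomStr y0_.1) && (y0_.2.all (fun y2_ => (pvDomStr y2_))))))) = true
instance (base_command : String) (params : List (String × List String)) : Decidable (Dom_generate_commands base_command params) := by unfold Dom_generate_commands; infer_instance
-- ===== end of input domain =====

-- B replaces itertools.product + per-combination zip loop by one fold over the keys that
-- extends a growing list of partial commands; same output, simpler decomposition.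

-- ===== PORT A =====
-- itertools.product(*values): left fold extending each partial tuple by each value of the next list
def pyProduct (values : List (List String)) : List (List String) :=
  values.foldl (fun acc vs => acc.flatMap (fun t => vs.map (fun v => t ++ [v]))) [[]]

def generate_commands (base_command : String) (params : List (String × List String)) : List String :=
  let keys := params.map (·.1)
  let values := params.map (·.2)
  let combinations := pyProduct values
  combinations.foldl
    (fun commands combination =>
      commands ++ [(keys.zip combination).foldl
        (fun command kv => command ++ " " ++ kv.1 ++ "=" ++ kv.2) base_command]) []

-- ===== PORT B =====
def generate_commands_alt (base_command : String) (params : List (String × List String)) : List String :=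
  params.foldl
    (fun results kv => results.flatMap (fun cmd => kv.2.map (fun v => cmd ++ " " ++ kv.1 ++ "=" ++ v)))
    [base_command]

-- ===== PRECONDITION & SPEC =====
def Spec_generate_commands (base_command : String) (params : List (String × List String)) (out : List String) : Prop := out = generate_commands_alt base_command params
instance (base_command : String) (params : List (String × List String)) (out : List String) : Decidable (Spec_generate_commands base_command params out) := by unfold Spec_generate_commands; infer_instance

-- ===== CLAIM (what is proved, stated in full; the proofs are below) =====
def Claim_equal_generate_commands : Prop := ∀ (base_command : String) (params : List (String × List String)), Dom_generate_commands base_command params → Spec_generate_commands base_command params (generate_commands base_command params)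

-- ===== LEMMAS AND PROOFS =====

-- shared reference: the right-recursive cartesian expansion of the commands
def cmdSpec (b : String) : List (String × List String) → List String
  | [] => [b]
  | (k, vs) :: rest => vs.flatMap (fun v => cmdSpec (b ++ " " ++ k ++ "=" ++ v) rest)

-- right-recursive product
def prodR : List (List String) → List (List String)
  | [] => [[]]
  | vs :: ls => vs.flatMap (fun v => (prodR ls).map (v :: ·))

theorem pyProduct_aux (ls : List (List String)) : ∀ acc : List (List String),
    ls.foldl (fun acc vs => acc.flatMap (fun t => vs.map (fun v => t ++ [v]))) acc
      = acc.flatMap (fun t => (prodR ls).map (t ++ ·)) := by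
  induction ls with
  | nil => intro acc; simp [prodR]
  | cons vs ls ih =>
      intro acc
      simp only [List.foldl_cons, ih, prodR, List.flatMap_assoc]
      congr 1; funext t
      simp [List.flatMap_map, List.map_flatMap, List.map_map, Function.comp_def,
        List.append_assoc]

theorem pyProduct_eq (ls : List (List String)) : pyProduct ls = prodR ls := by
  rw [pyProduct, pyProduct_aux]; simp

theorem A_eq_cmdSpec (params : List (String × List String)) : ∀ b : String,
    (prodR (params.map (·.2))).map
      (fun comb => ((params.map (·.1)).zip comb).foldl
        (fun command kv => command ++ " " ++ kv.1 ++ "=" ++ kv.2) b)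
      = cmdSpec b params := by
  induction params with
  | nil => intro b; simp [prodR, cmdSpec]
  | cons kv params ih =>
      intro b
      simp only [List.map_cons, prodR, cmdSpec, List.map_flatMap]
      congr 1; funext v
      simpa [List.map_map, Function.comp, List.zip_cons_cons] using ih (b ++ " " ++ kv.1 ++ "=" ++ v)

theorem B_eq_cmdSpec (params : List (String × List String)) : ∀ acc : List String,
    params.foldl
      (fun results kv => results.flatMap (fun cmd => kv.2.map (fun v => cmd ++ " " ++ kv.1 ++ "=" ++ v)))
      acc = acc.flatMap (fun b => cmdSpec b params) := by
  induction params with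
  | nil => intro acc; simp [cmdSpec]
  | cons kv params ih =>
      intro acc
      simp only [List.foldl_cons, ih, cmdSpec, List.flatMap_assoc]
      congr 1; funext b
      simp [List.flatMap_map]

-- ===== VERDICT (by name: the statement is the Claim_ definition above) =====
theorem generate_commands_spec : Claim_equal_generate_commands := by
  intro b params _
  show generate_commands b params = generate_commands_alt b params
  rw [generate_commands, generate_commands_alt, pyProduct_eq,
    PySem.List.foldl_append_singleton_eq_map, B_eq_cmdSpec]
  simpa using A_eq_cmdSpec params b
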